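-- pv_equiv track=rewrite | github.com/SarahMaria27/HiCExplorer | hicexplorer/hicMergeDomains.py | create_small_list
-- ===== SOURCE A (Python) =====
-- def create_small_list(dList):
--     sList = [[dList[0][0], []]]
--     chrom = dList[0][0]
--     pos = 0
--     while pos < len(dList):
--         if (dList[pos][0] == chrom):
--             sList[len(sList)-1][1].append(dList[pos][3])
--         else:
--             chrom = dList[pos][0]
--             sList.append([dList[pos][0], [dList[pos][3]]])
--         pos += 1
--     return sList
-- ===== SOURCE B (Python) =====
-- def create_small_list(dList):
--     result = []
--     i, n = 0, len(dList)
--     while i < n: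
--         key = dList[i][0]
--         j = i
--         while j < n and dList[j][0] == key:
--             j += 1
--         result.append([key, [row[3] for row in dList[i:j]]])
--         i = j
--     return result
-- ===== Notes on version B (the rewrite author's own statement) =====
-- stated objective: alternative
-- what changed: B groups consecutive equal-chromosome runs by scanning each run's extent and emitting a complete [key, positions] entry per run, instead of A's single index loop that tracks the current chromosome and mutates the last entry of the output in place.
-- crash fix: On the empty list A raises IndexError (it reads dList[0] before the loop) while B naturally returns []. — e.g. on create_small_list([]): A raises IndexError, B returns []
import Mathlib
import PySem

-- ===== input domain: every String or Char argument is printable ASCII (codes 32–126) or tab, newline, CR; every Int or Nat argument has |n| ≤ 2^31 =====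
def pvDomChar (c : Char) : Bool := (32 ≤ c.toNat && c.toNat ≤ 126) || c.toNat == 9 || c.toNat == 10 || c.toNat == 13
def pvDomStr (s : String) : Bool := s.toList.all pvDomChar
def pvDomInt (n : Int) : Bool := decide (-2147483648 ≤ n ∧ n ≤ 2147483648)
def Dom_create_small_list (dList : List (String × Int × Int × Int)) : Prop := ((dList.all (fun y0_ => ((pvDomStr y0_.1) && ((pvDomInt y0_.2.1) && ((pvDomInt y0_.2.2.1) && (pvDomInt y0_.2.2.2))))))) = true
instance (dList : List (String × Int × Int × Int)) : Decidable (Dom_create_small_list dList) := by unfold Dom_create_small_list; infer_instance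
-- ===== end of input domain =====

-- ===== PORT A =====
-- B restructures the grouping as run-at-a-time chunking (alternative decomposition); on the
-- empty list A raises IndexError while B returns [] (see Raises_). Return value only; A does not mutate its argument.

-- append x to the last group's position list (Python: sList[len(sList)-1][1].append(...))
def pvAppendLast (s : List (String × List Int)) (x : Int) : List (String × List Int) :=
  match s with
  | [] => []
  | [a] => [(a.1, a.2 ++ [x])]
  | a :: rest => a :: pvAppendLast rest x

-- A's while loop over the remaining rows, carrying sList and chrom
def pvALoop (rows : List (String × Int × Int × Int)) (sList : List (String × List Int))
    (chrom : String) : List (String × List Int) :=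
  match rows with
  | [] => sList
  | r :: rest =>
    if r.1 == chrom then pvALoop rest (pvAppendLast sList r.2.2.2) chrom
    else pvALoop rest (sList ++ [(r.1, [r.2.2.2])]) r.1

def create_small_list (dList : List (String × Int × Int × Int)) : List (String × List Int) :=
  match dList with
  | [] => []  -- Python raises IndexError here (dList[0]); excluded by Pre_
  | r0 :: _ => pvALoop dList [(r0.1, [])] r0.1

-- ===== PORT B =====
-- B: emit one complete (key, positions) chunk per maximal run of equal keys, then recurse on the rest
def create_small_list_alt (dList : List (String × Int × Int × Int)) : List (String × List Int) :=
  match dList with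
  | [] => []
  | r :: rest =>
    let run := rest.takeWhile (fun x => x.1 == r.1)
    (r.1, (r :: run).map (fun x => x.2.2.2)) ::
      create_small_list_alt (rest.dropWhile (fun x => x.1 == r.1))
termination_by dList.length
decreasing_by
  simp only [List.length_cons]
  exact Nat.lt_succ_of_le (List.length_dropWhile_le _ _)

-- ===== PRECONDITION & SPEC =====
-- Pre_ excludes only the empty list, on which Python A raises IndexError.
def Pre_create_small_list (dList : List (String × Int × Int × Int)) : Prop := dList ≠ []
instance (dList : List (String × Int × Int × Int)) : Decidable (Pre_create_small_list dList) := by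
  unfold Pre_create_small_list; infer_instance
def pvWitness_create_small_list : (List (String × Int × Int × Int)) := [("chr1", 0, 10, 3)]

-- On the empty list A raises IndexError (it reads dList[0] before the loop) while B returns [].
def Raises_create_small_list (dList : List (String × Int × Int × Int)) : Prop := dList = []
instance (dList : List (String × Int × Int × Int)) : Decidable (Raises_create_small_list dList) := by
  unfold Raises_create_small_list; infer_instance
def pvRaiseWitness_create_small_list : (List (String × Int × Int × Int)) := []
def pvRaiseWitnessOut_create_small_list : List (String × List Int) := []

def Spec_create_small_list (dList : List (String × Int × Int × Int)) (out : List (String × List Int)) : Prop := out = create_small_list_alt dList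
instance (dList : List (String × Int × Int × Int)) (out : List (String × List Int)) : Decidable (Spec_create_small_list dList out) := by unfold Spec_create_small_list; infer_instance

-- ===== CLAIM (what is proved, stated in full; the proofs are below) =====
def Claim_equal_create_small_list : Prop := ∀ (dList : List (String × Int × Int × Int)), Dom_create_small_list dList → Pre_create_small_list dList → Spec_create_small_list dList (create_small_list dList)
def Claim_raises_create_small_list : Prop := (∀ (dList : List (String × Int × Int × Int)), Dom_create_small_list dList → Raises_create_small_list dList → ¬ Pre_create_small_list dList) ∧ (Dom_create_small_list (pvRaiseWitness_create_small_list) ∧ Raises_create_small_list (pvRaiseWitness_create_small_list) ∧ create_small_list_alt (pvRaiseWitness_create_small_list) = pvRaiseWitnessOut_create_small_list)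

-- ===== LEMMAS AND PROOFS =====

-- ===== VERDICT (by name: the statement is the Claim_ definition above) =====
lemma pvAppendLast_append (s : List (String × List Int)) (c : String) (acc : List Int) (x : Int) :
    pvAppendLast (s ++ [(c, acc)]) x = s ++ [(c, acc ++ [x])] := by
  induction s with
  | nil => simp [pvAppendLast]
  | cons a t ih =>
    cases t with
    | nil => rfl
    | cons b u =>
      show a :: pvAppendLast ((b :: u) ++ [(c, acc)]) x = a :: ((b :: u) ++ [(c, acc ++ [x])])
      rw [ih]

lemma alt_cons (r : String × Int × Int × Int) (rest : List (String × Int × Int × Int)) :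
    create_small_list_alt (r :: rest)
      = (r.1, (r :: rest.takeWhile (fun x => x.1 == r.1)).map (fun x => x.2.2.2)) ::
        create_small_list_alt (rest.dropWhile (fun x => x.1 == r.1)) := by
  rw [create_small_list_alt.eq_def]

-- the glued form of A's loop state: current open group (chrom, acc), then B's chunks of the rest
def pvGlue (chrom : String) (acc : List Int) (rows : List (String × Int × Int × Int)) :
    List (String × List Int) :=
  (chrom, acc ++ (rows.takeWhile (fun x => x.1 == chrom)).map (fun x => x.2.2.2)) ::
    create_small_list_alt (rows.dropWhile (fun x => x.1 == chrom))

lemma pvALoop_eq (rows : List (String × Int × Int × Int)) :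
    ∀ (s : List (String × List Int)) (chrom : String) (acc : List Int),
    pvALoop rows (s ++ [(chrom, acc)]) chrom = s ++ pvGlue chrom acc rows := by
  induction rows with
  | nil => intro s chrom acc; simp [pvALoop, pvGlue, create_small_list_alt]
  | cons r rest ih =>
    intro s chrom acc
    by_cases h : r.1 = chrom
    · simp only [pvALoop, h, beq_self_eq_true, if_true, pvAppendLast_append]
      rw [ih]
      simp [pvGlue, h, List.takeWhile_cons, List.dropWhile_cons]
    · have hb : (r.1 == chrom) = false := beq_eq_false_iff_ne.mpr h
      simp only [pvALoop, hb, if_false]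
      have := ih (s ++ [(chrom, acc)]) r.1 [r.2.2.2]
      rw [show s ++ [(chrom, acc)] ++ [(r.1, [r.2.2.2])]
            = (s ++ [(chrom, acc)]) ++ [(r.1, [r.2.2.2])] by simp] at *
      rw [this]
      simp [pvGlue, hb, alt_cons, List.takeWhile_cons, List.dropWhile_cons]

theorem create_small_list_spec : Claim_equal_create_small_list := by
  intro dList _ hpre
  unfold Spec_create_small_list
  match dList with
  | [] => exact absurd rfl hpre
  | r0 :: rest =>
    show pvALoop (r0 :: rest) ([] ++ [(r0.1, [])]) r0.1 = _
    rw [pvALoop_eq]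
    simp [pvGlue, alt_cons, List.takeWhile_cons, List.dropWhile_cons]

@[simp] theorem create_small_list_raises : Claim_raises_create_small_list := by
  unfold Claim_raises_create_small_list
  refine ⟨fun d _ h => by simp [Raises_create_small_list] at h; simp [h, Pre_create_small_list],
    by decide, by decide, ?_⟩
  rw [pvRaiseWitness_create_small_list, create_small_list_alt.eq_def,
    pvRaiseWitnessOut_create_small_list]
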